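-- pv_equiv track=rewrite | github.com/AguilarPena/estudos-lp3 | 02-funcoes/exercicios/ex03.py | contar_vogais_consoantes
-- ===== SOURCE A (Python) =====
-- from collections import Counter
--
-- def contar_vogais_consoantes(frase):
--     vogais = 'aeiou'
--
--     # Deixar minúsculo e retirar os espaços
--     frase = frase.lower()
--     frase = frase.replace(" ","")
--
--     # Conta quantas vezes cada caracter aparece na frase
--     contador = Counter(frase)
--     # Conta a quantidade de vogais e soma
--     qtd_vogais = sum(contador[c] for c in vogais)
--     # Conta a quantidade de consoantes subtraindo os caracteres totais da quantidade de vogais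
--     qtd_consoantes = len(frase) - qtd_vogais
--
--     return qtd_vogais, qtd_consoantes
-- ===== SOURCE B (Python) =====
-- def contar_vogais_consoantes(frase):
--     frase = frase.lower().replace(" ", "")
--     qtd_vogais = 0
--     qtd_consoantes = 0
--     for c in frase:
--         if c in 'aeiou':
--             qtd_vogais += 1
--         else:
--             qtd_consoantes += 1
--     return qtd_vogais, qtd_consoantes
-- ===== Notes on version B (the rewrite author's own statement) =====
-- stated objective: simpler
-- what changed: Replaces the Counter frequency table plus sum over the five vowels plus len-minus-vowels subtraction with a single pass that classifies each character directly, keeping two counters.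
import Mathlib
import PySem

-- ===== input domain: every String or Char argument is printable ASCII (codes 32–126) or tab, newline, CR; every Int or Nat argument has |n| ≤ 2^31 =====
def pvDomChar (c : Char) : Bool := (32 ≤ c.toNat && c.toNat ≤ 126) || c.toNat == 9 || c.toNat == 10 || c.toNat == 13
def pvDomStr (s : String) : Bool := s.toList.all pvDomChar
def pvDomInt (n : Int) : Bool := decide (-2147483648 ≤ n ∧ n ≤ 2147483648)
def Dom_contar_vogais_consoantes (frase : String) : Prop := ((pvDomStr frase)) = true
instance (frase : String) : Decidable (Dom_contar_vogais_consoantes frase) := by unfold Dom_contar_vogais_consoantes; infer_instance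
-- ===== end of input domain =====

-- B replaces A's Counter table + sum over 'aeiou' + len-minus-vowels subtraction by one
-- direct classifying pass with two counters (simpler decomposition, same cost).


-- ===== PORT A =====
def contar_vogais_consoantes (frase : String) : Int × Int :=
  let vogais : List Char := "aeiou".toList
  let frase1 := PySem.Str.lower frase
  let frase2 := PySem.Str.replace frase1 " " ""
  let contador := PySem.Dict.counter frase2.toList
  let qtd_vogais : Int := (vogais.map (fun c => contador.getD c 0)).sum
  let qtd_consoantes : Int := PySem.Str.len frase2 - qtd_vogais
  (qtd_vogais, qtd_consoantes)

-- ===== PORT B =====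
-- 'c in "aeiou"' for a single character c: Python's substring test coincides with membership
def pvIsVowel (c : Char) : Bool := ['a','e','i','o','u'].contains c

def contar_vogais_consoantes_alt (frase : String) : Int × Int :=
  let frase' := PySem.Str.replace (PySem.Str.lower frase) " " ""
  frase'.toList.foldl
    (fun (acc : Int × Int) c => if pvIsVowel c then (acc.1 + 1, acc.2) else (acc.1, acc.2 + 1))
    (0, 0)

-- ===== PRECONDITION & SPEC =====
def Spec_contar_vogais_consoantes (frase : String) (out : Int × Int) : Prop := out = contar_vogais_consoantes_alt frase
instance (frase : String) (out : Int × Int) : Decidable (Spec_contar_vogais_consoantes frase out) := by unfold Spec_contar_vogais_consoantes; infer_instance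

-- ===== CLAIM (what is proved, stated in full; the proofs are below) =====
def Claim_equal_contar_vogais_consoantes : Prop := ∀ (frase : String), Dom_contar_vogais_consoantes frase → Spec_contar_vogais_consoantes frase (contar_vogais_consoantes frase)

-- ===== LEMMAS AND PROOFS =====

-- the five vowel counts sum to the number of vowel characters
lemma pv_sum_counts (cs : List Char) :
    ((['a','e','i','o','u'].map (fun v => ((cs.count v : Nat) : Int))).sum : Int)
      = (cs.countP pvIsVowel : Nat) := by
  induction cs with
  | nil => simp
  | cons c cs ih =>
    by_cases hv : pvIsVowel c = true
    · have hv' : c = 'a' ∨ c = 'e' ∨ c = 'i' ∨ c = 'o' ∨ c = 'u' := by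
        simpa [pvIsVowel] using hv
      rcases hv' with h|h|h|h|h <;> subst h <;>
        simp_all [List.count_cons, pvIsVowel] <;> omega
    · have hc : ∀ v ∈ (['a','e','i','o','u'] : List Char), ¬ (c = v) := by
        intro v hvmem hev
        apply hv
        subst hev
        simp [pvIsVowel] at hvmem ⊢
        rcases hvmem with h|h|h|h|h <;> simp [h]
      simp only [List.countP_cons, hv, if_neg, Bool.false_eq_true, not_false_iff]
      have hmap : (['a','e','i','o','u'].map (fun v => ((List.count v (c :: cs) : Nat) : Int)))
           = (['a','e','i','o','u'].map (fun v => ((cs.count v : Nat) : Int))) := by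
        apply List.map_congr_left
        intro v hvmem
        have := hc v hvmem
        simp [this]
      rw [hmap, ih]
      simp

-- the classifying fold computes (vowels, non-vowels) on top of any start accumulator
lemma pv_foldl_classify (cs : List Char) (a b : Int) :
    cs.foldl
      (fun (acc : Int × Int) c => if pvIsVowel c then (acc.1 + 1, acc.2) else (acc.1, acc.2 + 1))
      (a, b)
      = (a + (cs.countP pvIsVowel : Nat), b + (cs.countP (fun c => !pvIsVowel c) : Nat)) := by
  induction cs generalizing a b with
  | nil => simp
  | cons c cs ih =>
    by_cases hv : pvIsVowel c = true <;>
      simp only [List.foldl_cons, hv, if_pos, if_neg, Bool.false_eq_true, not_false_iff, ih,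
        List.countP_cons] <;>
      simp [Prod.ext_iff] <;> omega

-- ===== VERDICT (by name: the statement is the Claim_ definition above) =====
theorem contar_vogais_consoantes_spec : Claim_equal_contar_vogais_consoantes := by
  intro frase _
  unfold Spec_contar_vogais_consoantes contar_vogais_consoantes contar_vogais_consoantes_alt
  simp only [PySem.Dict.getD_counter, PySem.Str.len_eq]
  set cs := (PySem.Str.replace (PySem.Str.lower frase) " " "").toList with hcs
  rw [pv_foldl_classify cs 0 0]
  have hsum := pv_sum_counts cs
  have hlen := List.length_eq_countP_add_countP pvIsVowel (l := cs)
  have hnot : cs.countP (fun c => !pvIsVowel c)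
      = cs.countP (fun a => decide (¬ pvIsVowel a = true)) := by simp
  have hL : "aeiou".toList = (['a','e','i','o','u'] : List Char) := by decide
  simp only [hL, zero_add, Prod.mk.injEq]
  refine ⟨hsum, ?_⟩
  rw [hsum, hnot]
  omega
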